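-- pv_equiv track=rewrite | github.com/sejeonglee/ps | 2021MOBIS/problem1.py | solution
-- ===== SOURCE A (Python) =====
-- import itertools
--
-- def ordered_check_number(check_dict, dice_ordered, n):
--     check_dict[n] = True
--
--     if len(dice_ordered) == 0:
--         return
--
--     dice = dice_ordered[0]
--     next_dice_ordered = dice_ordered[1:]
--
--     for plane in dice:
--         next_n = n * 10 + plane
--         ordered_check_number(check_dict, next_dice_ordered, next_n)
--
-- def solution(dices):
--     check_dict = dict()
--     answer = 1
--
--     for dice_ordered in itertools.permutations(dices):
--         ordered_check_number(check_dict, dice_ordered, 0)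
--
--     s = set(check_dict.keys())
--
--     for i in range(1, 10000):
--         if i not in s:
--             answer = i
--             break
--
--     return answer
-- ===== SOURCE B (Python) =====
-- LIM = 2 ** 31  # on the stated input domain every face f has |f| <= 2**31, so once
--                # |n| > LIM every further value 10*n+f has |10n+f| >= 10|n|-LIM > LIM > 9999:
--                # nothing below that node can influence the answer, prune it.
--
-- def selections(xs):
--     """All ways to pick one element of xs: (picked, the rest in order)."""
--     if not xs:
--         return []
--     head, rest = xs[0], xs[1:]
--     out = [(head, rest)]
--     for d, r in selections(rest):
--         out.append((d, [head] + r))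
--     return out
--
--
-- def dfs(seen, rem, n):
--     # mark every value formable from n by appending faces of distinct remaining dice
--     for dice, rest in selections(rem):
--         for face in dice:
--             m = n * 10 + face
--             seen.add(m)
--             if -LIM <= m <= LIM:
--                 dfs(seen, rest, m)
--     return seen
--
--
-- def solution(dices):
--     seen = dfs({0}, dices, 0)
--     for i in range(1, 10000):
--         if i not in seen:
--             return i
--     return 1
-- ===== Notes on version B (the rewrite author's own statement) =====
-- stated objective: alternative
-- what changed: A walks all N! full permutations and re-marks every prefix; B runs one DFS over ordered selections of distinct dice into a set, pruning branches whose value leaves [-2^31, 2^31] (sound on the stated domain |face| <= 2^31, since such values can never return below 10000), then scans 1..9999 for the first missing value.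
import Mathlib
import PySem

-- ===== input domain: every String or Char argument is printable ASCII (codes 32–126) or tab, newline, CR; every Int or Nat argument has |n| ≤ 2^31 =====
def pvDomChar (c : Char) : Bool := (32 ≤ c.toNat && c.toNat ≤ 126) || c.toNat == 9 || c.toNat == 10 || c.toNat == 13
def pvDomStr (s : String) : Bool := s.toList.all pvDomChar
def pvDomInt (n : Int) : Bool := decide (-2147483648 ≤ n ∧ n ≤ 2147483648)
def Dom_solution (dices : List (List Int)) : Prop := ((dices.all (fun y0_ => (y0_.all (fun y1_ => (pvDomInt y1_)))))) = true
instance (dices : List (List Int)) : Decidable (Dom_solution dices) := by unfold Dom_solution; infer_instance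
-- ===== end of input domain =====

-- B replaces A's walk over all N! full permutations by one DFS over ordered selections of
-- distinct dice, with a sound value-bound prune (|face| ≤ 2^31 on the stated domain).

-- ===== PORT A =====
-- Python's check_dict maps keys to the constant True and is consumed only through
-- 'set(check_dict.keys())' membership, so it is modeled by an ordered set of its keys
-- (Std.TreeSet: a list-backed dict would make evaluation infeasible; insertion order,
-- which a TreeSet does not keep, is unobservable in the result).
def ordered_check_number (check_dict : Std.TreeSet Int) (dice_ordered : List (List Int)) (n : Int) : Std.TreeSet Int :=
  match dice_ordered with
  | [] => check_dict.insert n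
  | dice :: rest =>
      dice.foldl (fun d plane => ordered_check_number d rest (n * 10 + plane)) (check_dict.insert n)

-- the 'for i in range(1, 10000): if i not in s: answer = i; break' loop of A
def pvLoopA (s : Std.TreeSet Int) : List Int → Int → Int
  | [], answer => answer
  | i :: rest, answer => if s.contains i then pvLoopA s rest answer else i

def solution (dices : List (List Int)) : Int :=
  let check_dict := (PySem.List.permutations dices dices.length).foldl
      (fun d p => ordered_check_number d p 0) Std.TreeSet.empty
  let s := check_dict
  pvLoopA s (PySem.List.pyRange 1 10000 1) 1

-- ===== PORT B =====
def pvSelections {α : Type} : List α → List (α × List α)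
  | [] => []
  | x :: xs => (x, xs) :: (pvSelections xs).map (fun p => (p.1, x :: p.2))

-- needed by dfsB's termination proof (cited in decreasing_by)
theorem pvSelections_length {α : Type} : ∀ {xs : List α} {p : α × List α},
    p ∈ pvSelections xs → p.2.length + 1 = xs.length := by
  intro xs
  induction xs with
  | nil => intro p h; simp [pvSelections] at h
  | cons x t ih =>
    intro p h
    simp only [pvSelections, List.mem_cons, List.mem_map] at h
    rcases h with h | ⟨q, hq, rfl⟩
    · subst h; simp
    · have := ih hq; simp; omega

-- B's seen is likewise consumed only through membership: same ordered-set model.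
def dfsB (seen : Std.TreeSet Int) (rem : List (List Int)) (n : Int) : Std.TreeSet Int :=
  (pvSelections rem).attach.foldl
    (fun acc pr =>
      pr.1.1.foldl
        (fun a face =>
          if -2147483648 ≤ n * 10 + face ∧ n * 10 + face ≤ 2147483648 then
            dfsB (a.insert (n * 10 + face)) pr.1.2 (n * 10 + face)
          else a.insert (n * 10 + face))
        acc)
    seen
termination_by rem.length
decreasing_by
  have := pvSelections_length pr.2; omega

def pvLoopB (seen : Std.TreeSet Int) : List Int → Int
  | [] => 1
  | i :: rest => if seen.contains i then pvLoopB seen rest else i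

def solution_alt (dices : List (List Int)) : Int :=
  let seen := dfsB (Std.TreeSet.empty.insert 0) dices 0
  pvLoopB seen (PySem.List.pyRange 1 10000 1)

-- ===== PRECONDITION & SPEC =====
def Spec_solution (dices : List (List Int)) (out : Int) : Prop := out = solution_alt dices
instance (dices : List (List Int)) (out : Int) : Decidable (Spec_solution dices out) := by unfold Spec_solution; infer_instance

-- ===== CLAIM (what is proved, stated in full; the proofs are below) =====
def Claim_equal_solution : Prop := ∀ (dices : List (List Int)), Dom_solution dices → Spec_solution dices (solution dices)

-- ===== LEMMAS AND PROOFS =====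

def pvInB (x : Int) : Prop := -2147483648 ≤ x ∧ x ≤ 2147483648

-- value marked by one run of ordered_check_number over the ordered dice list p, from n
def MarkedP : List (List Int) → Int → Int → Prop
  | [], n, m => m = n
  | dice :: rest, n, m => m = n ∨ ∃ f ∈ dice, MarkedP rest (n * 10 + f) m

-- full (unpruned) strict reachability: m arises from n by appending ≥ 1 faces of distinct dice of rem
def Reach (rem : List (List Int)) (n m : Int) : Prop :=
  ∃ pr ∈ (pvSelections rem).attach, ∃ f ∈ pr.1.1,
    (m = n * 10 + f ∨ Reach pr.1.2 (n * 10 + f) m)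
termination_by rem.length
decreasing_by have := pvSelections_length pr.2; omega

-- pruned reachability, mirroring dfsB's guard
def ReachP (rem : List (List Int)) (n m : Int) : Prop :=
  ∃ pr ∈ (pvSelections rem).attach, ∃ f ∈ pr.1.1,
    (m = n * 10 + f ∨ (pvInB (n * 10 + f) ∧ ReachP pr.1.2 (n * 10 + f) m))
termination_by rem.length
decreasing_by have := pvSelections_length pr.2; omega

theorem Reach_iff (rem : List (List Int)) (n m : Int) :
    Reach rem n m ↔ ∃ pr ∈ pvSelections rem, ∃ f ∈ pr.1,
      (m = n * 10 + f ∨ Reach pr.2 (n * 10 + f) m) := by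
  rw [Reach]
  constructor
  · rintro ⟨⟨pr, hpr⟩, -, hf⟩
    exact ⟨pr, hpr, hf⟩
  · rintro ⟨pr, hpr, hf⟩
    exact ⟨⟨pr, hpr⟩, List.mem_attach _ _, hf⟩
theorem ReachP_iff (rem : List (List Int)) (n m : Int) :
    ReachP rem n m ↔ ∃ pr ∈ pvSelections rem, ∃ f ∈ pr.1,
      (m = n * 10 + f ∨ (pvInB (n * 10 + f) ∧ ReachP pr.2 (n * 10 + f) m)) := by
  rw [ReachP]
  constructor
  · rintro ⟨⟨pr, hpr⟩, -, hf⟩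
    exact ⟨pr, hpr, hf⟩
  · rintro ⟨pr, hpr, hf⟩
    exact ⟨⟨pr, hpr⟩, List.mem_attach _ _, hf⟩

theorem mem_pvSelections {α : Type} : ∀ (xs : List α) (pr : α × List α),
    pr ∈ pvSelections xs ↔ ∃ i, ∃ _ : i < xs.length, pr = (xs[i], xs.eraseIdx i) := by
  intro xs
  induction xs with
  | nil => intro pr; simp [pvSelections]
  | cons x t ih =>
    intro pr
    simp only [pvSelections, List.mem_cons, List.mem_map]
    constructor
    · rintro (rfl | ⟨q, hq, rfl⟩)
      · exact ⟨0, by simp, by simp⟩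
      · rcases (ih q).mp hq with ⟨i, hi, rfl⟩
        exact ⟨i + 1, by simpa using hi, by simp⟩
    · rintro ⟨i, hi, rfl⟩
      match i with
      | 0 => left; simp
      | j + 1 =>
        right
        have hj : j < t.length := by simpa using hi
        refine ⟨(t[j], t.eraseIdx j), (ih _).mpr ⟨j, hj, rfl⟩, by simp⟩

theorem pvSelections_sub {α : Type} {xs : List α} {pr : α × List α} (h : pr ∈ pvSelections xs) :
    pr.1 ∈ xs ∧ ∀ d ∈ pr.2, d ∈ xs := by
  rcases (mem_pvSelections xs pr).mp h with ⟨i, hi, rfl⟩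
  exact ⟨List.getElem_mem hi, fun d hd => (List.eraseIdx_sublist xs i).mem hd⟩

theorem ts_mem_insert (t : Std.TreeSet Int) (k x : Int) : x ∈ t.insert k ↔ x ∈ t ∨ x = k := by
  rw [Std.TreeSet.mem_insert, compare_eq_iff_eq]
  constructor
  · rintro (rfl | h); exacts [Or.inr rfl, Or.inl h]
  · rintro (h | rfl); exacts [Or.inr h, Or.inl rfl]

theorem loopAB (s t : Std.TreeSet Int) : ∀ (l : List Int),
    (∀ i ∈ l, s.contains i = t.contains i) →
    pvLoopA s l 1 = pvLoopB t l := by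
  intro l
  induction l with
  | nil => intro _; rfl
  | cons i rest ih =>
    intro h
    simp only [pvLoopA, pvLoopB, h i (List.mem_cons_self)]
    split
    · exact ih fun j hj => h j (List.mem_cons_of_mem _ hj)
    · rfl
theorem perms_zero (xs : List (List Int)) : PySem.List.permutations xs 0 = [[]] := by
  rw [PySem.List.permutations]

theorem perms_succ (xs : List (List Int)) (r : Nat) : PySem.List.permutations xs (r+1) =
    (List.range xs.length).flatMap (fun i =>
      match xs[i]? with
      | none => []
      | some x => (PySem.List.permutations (xs.eraseIdx i) r).map (fun p => x :: p)) := by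
  rw [PySem.List.permutations]
  congr 1
  funext i
  cases xs[i]? <;> rfl

theorem mem_perms_succ (xs : List (List Int)) (r : Nat) (p : List (List Int)) :
    p ∈ PySem.List.permutations xs (r + 1) ↔
      ∃ i, ∃ _ : i < xs.length, ∃ q ∈ PySem.List.permutations (xs.eraseIdx i) r, p = xs[i] :: q := by
  rw [perms_succ]
  simp only [List.mem_flatMap, List.mem_range]
  constructor
  · rintro ⟨i, hi, hp⟩
    rw [List.getElem?_eq_getElem hi] at hp
    simp only [List.mem_map] at hp
    rcases hp with ⟨q, hq, rfl⟩
    exact ⟨i, hi, q, hq, rfl⟩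
  · rintro ⟨i, hi, q, hq, rfl⟩
    refine ⟨i, hi, ?_⟩
    rw [List.getElem?_eq_getElem hi]
    simp only [List.mem_map]
    exact ⟨q, hq, rfl⟩

theorem perms_ne_nil : ∀ (r : Nat) (xs : List (List Int)), xs.length = r →
    PySem.List.permutations xs r ≠ [] := by
  intro r
  induction r with
  | zero => intro xs _; rw [perms_zero]; simp
  | succ k ih =>
    intro xs hlen hnil
    have h0 : 0 < xs.length := by omega
    have : xs[0] :: (PySem.List.permutations (xs.eraseIdx 0) k).headI ∈ PySem.List.permutations xs (k+1) := by
      rw [mem_perms_succ]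
      refine ⟨0, h0, _, ?_, rfl⟩
      have hlen' : (xs.eraseIdx 0).length = k := by
        rw [List.length_eraseIdx_of_lt h0]; omega
      have := ih (xs.eraseIdx 0) hlen'
      cases hperm : PySem.List.permutations (xs.eraseIdx 0) k with
      | nil => exact absurd hperm this
      | cons a t => simp
    rw [hnil] at this
    exact absurd this (List.not_mem_nil)
theorem keys_ordered_check : ∀ (p : List (List Int)) (d : Std.TreeSet Int) (n m : Int),
    m ∈ ordered_check_number d p n ↔ m ∈ d ∨ MarkedP p n m := by
  intro p
  induction p with
  | nil =>
    intro d n m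
    simp only [ordered_check_number, MarkedP, ts_mem_insert]
  | cons dice rest ih =>
    intro d n m
    have aux : ∀ (fs : List Int) (d0 : Std.TreeSet Int),
        m ∈ fs.foldl (fun d f => ordered_check_number d rest (n * 10 + f)) d0 ↔
          m ∈ d0 ∨ ∃ f ∈ fs, MarkedP rest (n * 10 + f) m := by
      intro fs
      induction fs with
      | nil => intro d0; simp
      | cons f ft iht =>
        intro d0
        simp only [List.foldl_cons, iht, ih, List.mem_cons]
        constructor
        · rintro ((h | h) | ⟨g, hg, h⟩)
          · exact Or.inl h
          · exact Or.inr ⟨f, Or.inl rfl, h⟩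
          · exact Or.inr ⟨g, Or.inr hg, h⟩
        · rintro (h | ⟨g, (rfl | hg), h⟩)
          · exact Or.inl (Or.inl h)
          · exact Or.inl (Or.inr h)
          · exact Or.inr ⟨g, hg, h⟩
    show m ∈ (dice.foldl (fun d plane => ordered_check_number d rest (n * 10 + plane)) (d.insert n)) ↔ _
    rw [aux]
    simp only [ts_mem_insert, MarkedP]
    tauto
theorem keys_foldA : ∀ (ps : List (List (List Int))) (d : Std.TreeSet Int) (m : Int),
    m ∈ ps.foldl (fun d p => ordered_check_number d p 0) d ↔
      m ∈ d ∨ ∃ p ∈ ps, MarkedP p 0 m := by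
  intro ps
  induction ps with
  | nil => intro d m; simp
  | cons p pt ih =>
    intro d m
    simp only [List.foldl_cons, ih, keys_ordered_check, List.mem_cons]
    constructor
    · rintro ((h | h) | ⟨q, hq, h⟩)
      · exact Or.inl h
      · exact Or.inr ⟨p, Or.inl rfl, h⟩
      · exact Or.inr ⟨q, Or.inr hq, h⟩
    · rintro (h | ⟨q, (rfl | hq), h⟩)
      · exact Or.inl (Or.inl h)
      · exact Or.inl (Or.inr h)
      · exact Or.inr ⟨q, hq, h⟩

theorem reachP_reach : ∀ (r : Nat) (rem : List (List Int)), rem.length = r →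
    ∀ n m, ReachP rem n m → Reach rem n m := by
  intro r
  induction r using Nat.strong_induction_on with
  | _ r IH =>
    intro rem hlen n m h
    rw [ReachP_iff] at h
    rw [Reach_iff]
    rcases h with ⟨pr, hpr, f, hf, hcase⟩
    refine ⟨pr, hpr, f, hf, ?_⟩
    rcases hcase with h | ⟨-, h⟩
    · exact Or.inl h
    · have hl := pvSelections_length hpr
      exact Or.inr (IH pr.2.length (by omega) pr.2 rfl _ _ h)

theorem escape : ∀ (r : Nat) (rem : List (List Int)), rem.length = r →
    (∀ d ∈ rem, ∀ f ∈ d, pvInB f) → ∀ n m, ¬ pvInB n → Reach rem n m → ¬ pvInB m := by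
  intro r
  induction r using Nat.strong_induction_on with
  | _ r IH =>
    intro rem hlen hb n m hn h
    rw [Reach_iff] at h
    rcases h with ⟨pr, hpr, f, hf, hcase⟩
    have hsub := pvSelections_sub hpr
    have hfB : pvInB f := hb pr.1 hsub.1 f hf
    have hmid : ¬ pvInB (n * 10 + f) := by
      unfold pvInB at *; omega
    rcases hcase with rfl | h
    · exact hmid
    · have hl := pvSelections_length hpr
      exact IH pr.2.length (by omega) pr.2 rfl (fun d hd => hb d (hsub.2 d hd)) _ _ hmid h

theorem reach_reachP : ∀ (r : Nat) (rem : List (List Int)), rem.length = r →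
    (∀ d ∈ rem, ∀ f ∈ d, pvInB f) → ∀ n m, pvInB m → Reach rem n m → ReachP rem n m := by
  intro r
  induction r using Nat.strong_induction_on with
  | _ r IH =>
    intro rem hlen hb n m hm h
    rw [Reach_iff] at h
    rw [ReachP_iff]
    rcases h with ⟨pr, hpr, f, hf, hcase⟩
    refine ⟨pr, hpr, f, hf, ?_⟩
    rcases hcase with h | h
    · exact Or.inl h
    · have hl := pvSelections_length hpr
      have hsub := pvSelections_sub hpr
      by_cases hmid : pvInB (n * 10 + f)
      · exact Or.inr ⟨hmid, IH pr.2.length (by omega) pr.2 rfl (fun d hd => hb d (hsub.2 d hd)) _ _ hm h⟩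
      · exact absurd hm (escape pr.2.length pr.2 rfl (fun d hd => hb d (hsub.2 d hd)) _ _ hmid h)
theorem MarkedP_self : ∀ (p : List (List Int)) (n : Int), MarkedP p n n := by
  intro p n; cases p <;> simp [MarkedP]

theorem Reach_nil (n m : Int) : ¬ Reach [] n m := by
  rw [Reach_iff]; simp [pvSelections]

theorem QA_iff : ∀ (r : Nat) (xs : List (List Int)), xs.length = r → ∀ (n m : Int),
    ((∃ p ∈ PySem.List.permutations xs r, MarkedP p n m) ↔ (m = n ∨ Reach xs n m)) := by
  intro r
  induction r with
  | zero =>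
    intro xs hlen n m
    have hx : xs = [] := List.length_eq_zero_iff.mp hlen
    subst hx
    rw [perms_zero]
    simp [MarkedP, Reach_nil]
  | succ k ih =>
    intro xs hlen n m
    constructor
    · rintro ⟨p, hp, hM⟩
      rcases (mem_perms_succ xs k p).mp hp with ⟨i, hi, q, hq, rfl⟩
      rcases hM with rfl | ⟨f, hf, hM⟩
      · exact Or.inl rfl
      · right
        rw [Reach_iff]
        have hel : (xs.eraseIdx i).length = k := by
          rw [List.length_eraseIdx_of_lt hi]; omega
        refine ⟨(xs[i], xs.eraseIdx i), (mem_pvSelections xs _).mpr ⟨i, hi, rfl⟩, f, hf, ?_⟩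
        exact (ih (xs.eraseIdx i) hel (n * 10 + f) m).mp ⟨q, hq, hM⟩
    · rintro (rfl | hR)
      · rcases List.exists_mem_of_ne_nil _ (perms_ne_nil (k+1) xs hlen) with ⟨p, hp⟩
        exact ⟨p, hp, MarkedP_self p m⟩
      · rw [Reach_iff] at hR
        rcases hR with ⟨pr, hpr, f, hf, hcase⟩
        rcases (mem_pvSelections xs pr).mp hpr with ⟨i, hi, rfl⟩
        have hel : (xs.eraseIdx i).length = k := by
          rw [List.length_eraseIdx_of_lt hi]; omega
        rcases (ih (xs.eraseIdx i) hel (n * 10 + f) m).mpr hcase with ⟨q, hq, hM⟩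
        refine ⟨xs[i] :: q, (mem_perms_succ xs k _).mpr ⟨i, hi, q, hq, rfl⟩, ?_⟩
        exact Or.inr ⟨f, hf, hM⟩
theorem mem_dfsB : ∀ (r : Nat) (rem : List (List Int)), rem.length = r →
    ∀ (seen : Std.TreeSet Int) (n m : Int),
      (m ∈ dfsB seen rem n ↔ m ∈ seen ∨ ReachP rem n m) := by
  intro r
  induction r using Nat.strong_induction_on with
  | _ r IH =>
    intro rem hlen seen n m
    have aux : ∀ (l : List {x // x ∈ pvSelections rem}) (acc : Std.TreeSet Int),
        m ∈ l.foldl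
            (fun acc pr =>
              pr.1.1.foldl
                (fun a face =>
                  if -2147483648 ≤ n * 10 + face ∧ n * 10 + face ≤ 2147483648 then
                    dfsB (a.insert (n * 10 + face)) pr.1.2 (n * 10 + face)
                  else a.insert (n * 10 + face))
                acc)
            acc ↔
          m ∈ acc ∨ ∃ pr ∈ l, ∃ f ∈ pr.1.1,
            (m = n * 10 + f ∨ (pvInB (n * 10 + f) ∧ ReachP pr.1.2 (n * 10 + f) m)) := by
      intro l
      induction l with
      | nil => intro acc; simp
      | cons pr pt iht =>
        intro acc
        have hl := pvSelections_length pr.2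
        have inner : ∀ (fs : List Int) (a0 : Std.TreeSet Int),
            m ∈ fs.foldl
                (fun a face =>
                  if -2147483648 ≤ n * 10 + face ∧ n * 10 + face ≤ 2147483648 then
                    dfsB (a.insert (n * 10 + face)) pr.1.2 (n * 10 + face)
                  else a.insert (n * 10 + face))
                a0 ↔
              m ∈ a0 ∨ ∃ f ∈ fs,
                (m = n * 10 + f ∨ (pvInB (n * 10 + f) ∧ ReachP pr.1.2 (n * 10 + f) m)) := by
          intro fs
          induction fs with
          | nil => intro a0; simp
          | cons f ft ihf =>
            intro a0
            simp only [List.foldl_cons, ihf, List.mem_cons]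
            have hstep : m ∈ (if -2147483648 ≤ n * 10 + f ∧ n * 10 + f ≤ 2147483648 then
                    dfsB (a0.insert (n * 10 + f)) pr.1.2 (n * 10 + f)
                  else a0.insert (n * 10 + f)) ↔
                m ∈ a0 ∨ (m = n * 10 + f ∨ (pvInB (n * 10 + f) ∧ ReachP pr.1.2 (n * 10 + f) m)) := by
              split_ifs with hB
              · rw [IH pr.1.2.length (by omega) pr.1.2 rfl]
                simp only [ts_mem_insert]
                constructor
                · rintro ((h | h) | h)
                  · exact Or.inl h
                  · exact Or.inr (Or.inl h)
                  · exact Or.inr (Or.inr ⟨hB, h⟩)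
                · rintro (h | (h | ⟨-, h⟩))
                  · exact Or.inl (Or.inl h)
                  · exact Or.inl (Or.inr h)
                  · exact Or.inr h
              · simp only [ts_mem_insert]
                constructor
                · rintro (h | h)
                  · exact Or.inl h
                  · exact Or.inr (Or.inl h)
                · rintro (h | (h | ⟨hB', -⟩))
                  · exact Or.inl h
                  · exact Or.inr h
                  · exact absurd hB' hB
            rw [hstep]
            constructor
            · rintro ((h | h) | ⟨g, hg, h⟩)
              · exact Or.inl h
              · exact Or.inr ⟨f, Or.inl rfl, h⟩
              · exact Or.inr ⟨g, Or.inr hg, h⟩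
            · rintro (h | ⟨g, (rfl | hg), h⟩)
              · exact Or.inl (Or.inl h)
              · exact Or.inl (Or.inr h)
              · exact Or.inr ⟨g, hg, h⟩
        simp only [List.foldl_cons, iht, inner, List.mem_cons]
        constructor
        · rintro ((h | ⟨f, hf, h⟩) | ⟨q, hq, h⟩)
          · exact Or.inl h
          · exact Or.inr ⟨pr, Or.inl rfl, f, hf, h⟩
          · exact Or.inr ⟨q, Or.inr hq, h⟩
        · rintro (h | ⟨q, (rfl | hq), h⟩)
          · exact Or.inl (Or.inl h)
          · exact Or.inl (Or.inr h)
          · exact Or.inr ⟨q, hq, h⟩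
    rw [dfsB, ReachP]
    exact aux _ seen
-- ===== VERDICT (by name: the statement is the Claim_ definition above) =====
theorem solution_spec : Claim_equal_solution := by
  intro dices hdom
  unfold Spec_solution solution solution_alt
  have hb : ∀ d ∈ dices, ∀ f ∈ d, pvInB f := by
    simp only [Dom_solution, List.all_eq_true, pvDomInt, decide_eq_true_eq] at hdom
    intro d hd f hf
    exact hdom d hd f hf
  apply loopAB
  intro i hi
  have hib : 1 ≤ i ∧ i < 10000 := (PySem.List.mem_pyRange_one.mp hi)
  have hiB : pvInB i := by unfold pvInB; omega
  rw [Bool.eq_iff_iff, Std.TreeSet.contains_iff_mem, Std.TreeSet.contains_iff_mem]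
  rw [keys_foldA, mem_dfsB dices.length dices rfl]
  rw [QA_iff dices.length dices rfl 0 i]
  simp only [Std.TreeSet.empty_eq_emptyc, Std.TreeSet.not_mem_emptyc, false_or, ts_mem_insert]
  constructor
  · rintro (rfl | h)
    · omega
    · exact Or.inr (reach_reachP dices.length dices rfl hb 0 i hiB h)
  · rintro (rfl | h)
    · omega
    · exact Or.inr (reachP_reach dices.length dices rfl 0 i h)
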